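-- pv_equiv track=rewrite | github.com/dongphuonghong/labPython | lab5/bt61.py | kiemTraChuSoChanLe
-- ===== SOURCE A (Python) =====
-- def kiemTraChuSoChanLe(n):
--     toan_chan = True
--     toan_le = True
--     while n > 0:
--         chu_so = n % 10
--         if chu_so % 2 == 0:
--             toan_le = False
--         else:
--             toan_chan = False
--         n //= 10
--     return toan_chan, toan_le
-- ===== SOURCE B (Python) =====
-- def kiemTraChuSoChanLe(n):
--     digits = set()
--     while n > 0:
--         digits.add(n % 10)
--         n //= 10
--     return digits <= {0, 2, 4, 6, 8}, digits <= {1, 3, 5, 7, 9}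
-- ===== Notes on version B (the rewrite author's own statement) =====
-- stated objective: simpler
-- what changed: Collect the distinct digits into a set in one pass, then answer both questions with two subset tests against the even-digit and odd-digit sets, replacing the per-digit flag-flipping branches.
import Mathlib
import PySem

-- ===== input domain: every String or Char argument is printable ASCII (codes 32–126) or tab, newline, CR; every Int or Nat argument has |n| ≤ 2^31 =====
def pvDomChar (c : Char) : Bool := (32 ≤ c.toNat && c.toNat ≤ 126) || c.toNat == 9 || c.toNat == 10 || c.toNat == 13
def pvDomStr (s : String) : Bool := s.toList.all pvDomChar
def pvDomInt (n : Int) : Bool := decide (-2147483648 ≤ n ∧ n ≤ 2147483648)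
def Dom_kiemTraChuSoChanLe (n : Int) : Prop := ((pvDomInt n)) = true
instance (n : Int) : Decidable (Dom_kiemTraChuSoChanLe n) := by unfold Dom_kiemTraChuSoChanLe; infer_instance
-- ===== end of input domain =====

-- B replaces the per-digit even/odd flag flipping by collecting the digit set and
-- doing two subset tests; objective: simpler.

-- ===== PORT A =====
def kLoopA (n : Int) (toan_chan toan_le : Bool) : Bool × Bool :=
  if h : n > 0 then
    let chu_so := PySem.Int.mod n 10
    if PySem.Int.mod chu_so 2 == 0 then
      kLoopA (PySem.Int.floordiv n 10) toan_chan false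
    else
      kLoopA (PySem.Int.floordiv n 10) false toan_le
  else (toan_chan, toan_le)
termination_by n.toNat
decreasing_by
  all_goals
    rw [PySem.Int.floordiv_eq_ediv_of_pos (by norm_num : (0:Int) < 10)]
    omega

def kiemTraChuSoChanLe (n : Int) : Bool × Bool := kLoopA n true true

-- ===== PORT B =====
def sLoopB (n : Int) (digits : PySem.Set Int) : PySem.Set Int :=
  if h : n > 0 then
    sLoopB (PySem.Int.floordiv n 10) (PySem.Set.add digits (PySem.Int.mod n 10))
  else digits
termination_by n.toNat
decreasing_by
  rw [PySem.Int.floordiv_eq_ediv_of_pos (by norm_num : (0:Int) < 10)]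
  omega

def kiemTraChuSoChanLe_alt (n : Int) : Bool × Bool :=
  let digits := sLoopB n PySem.Set.empty
  (PySem.Set.issubset digits (PySem.Set.ofList [0, 2, 4, 6, 8]),
   PySem.Set.issubset digits (PySem.Set.ofList [1, 3, 5, 7, 9]))

-- ===== PRECONDITION & SPEC =====
def Spec_kiemTraChuSoChanLe (n : Int) (out : Bool × Bool) : Prop := out = kiemTraChuSoChanLe_alt n
instance (n : Int) (out : Bool × Bool) : Decidable (Spec_kiemTraChuSoChanLe n out) := by unfold Spec_kiemTraChuSoChanLe; infer_instance

-- ===== CLAIM (what is proved, stated in full; the proofs are below) =====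
def Claim_equal_kiemTraChuSoChanLe : Prop := ∀ (n : Int), Dom_kiemTraChuSoChanLe n → Spec_kiemTraChuSoChanLe n (kiemTraChuSoChanLe n)

-- ===== LEMMAS AND PROOFS =====

-- the digits of n (least significant first); empty for n ≤ 0
def pvDigits (n : Int) : List Int :=
  if h : n > 0 then PySem.Int.mod n 10 :: pvDigits (PySem.Int.floordiv n 10) else []
termination_by n.toNat
decreasing_by
  rw [PySem.Int.floordiv_eq_ediv_of_pos (by norm_num : (0:Int) < 10)]
  omega

lemma pvDigits_range : ∀ (k : Nat) (n : Int), n.toNat ≤ k →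
    ∀ d ∈ pvDigits n, 0 ≤ d ∧ d < 10 := by
  intro k
  induction k with
  | zero =>
    intro n hn d hd
    rw [pvDigits] at hd
    have : ¬ n > 0 := by omega
    simp [this] at hd
  | succ k ih =>
    intro n hn d hd
    rw [pvDigits] at hd
    by_cases h : n > 0
    · simp only [h, dif_pos] at hd
      rcases List.mem_cons.mp hd with hd | hd
      · subst hd
        exact ⟨PySem.Int.mod_nonneg _ (by norm_num), PySem.Int.mod_lt _ (by norm_num)⟩
      · apply ih (PySem.Int.floordiv n 10) _ d hd
        rw [PySem.Int.floordiv_eq_ediv_of_pos (by norm_num : (0:Int) < 10)]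
        omega
    · simp [h] at hd

lemma kLoopA_eq : ∀ (k : Nat) (n : Int), n.toNat ≤ k → ∀ (tc tl : Bool),
    kLoopA n tc tl =
      (tc && (pvDigits n).all (fun d => PySem.Int.mod d 2 == 0),
       tl && (pvDigits n).all (fun d => !(PySem.Int.mod d 2 == 0))) := by
  intro k
  induction k with
  | zero =>
    intro n hn tc tl
    have : ¬ n > 0 := by omega
    rw [kLoopA, pvDigits]
    simp [this]
  | succ k ih =>
    intro n hn tc tl
    by_cases h : n > 0
    · have hlt : (PySem.Int.floordiv n 10).toNat ≤ k := by
        rw [PySem.Int.floordiv_eq_ediv_of_pos (by norm_num : (0:Int) < 10)]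
        omega
      rw [kLoopA, pvDigits]
      simp only [h, dif_pos]
      by_cases hc : PySem.Int.mod (PySem.Int.mod n 10) 2 == 0
      · simp only [hc, if_pos, ih _ hlt, List.all_cons]
        simp
      · simp only [hc, if_neg, ih _ hlt, List.all_cons]
        simp at hc
        simp
    · rw [kLoopA, pvDigits]
      simp [h]

lemma sLoopB_mem : ∀ (k : Nat) (n : Int), n.toNat ≤ k → ∀ (s : PySem.Set Int) (y : Int),
    y ∈ sLoopB n s ↔ y ∈ s ∨ y ∈ pvDigits n := by
  intro k
  induction k with
  | zero =>
    intro n hn s y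
    have : ¬ n > 0 := by omega
    rw [sLoopB, pvDigits]
    simp [this]
  | succ k ih =>
    intro n hn s y
    rw [sLoopB, pvDigits]
    by_cases h : n > 0
    · have hlt : (PySem.Int.floordiv n 10).toNat ≤ k := by
        rw [PySem.Int.floordiv_eq_ediv_of_pos (by norm_num : (0:Int) < 10)]
        omega
      simp only [h, dif_pos, ih _ hlt, PySem.Set.mem_add, List.mem_cons]
      tauto
    · simp [h]

lemma digit_even_iff (d : Int) (h0 : 0 ≤ d) (h10 : d < 10) :
    (PySem.Int.mod d 2 == 0) = true ↔ d ∈ [(0:Int), 2, 4, 6, 8] := by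
  rw [PySem.Int.mod_eq_emod_of_pos (by norm_num : (0:Int) < 2)]
  simp only [beq_iff_eq, List.mem_cons, List.not_mem_nil, or_false]
  omega

lemma digit_odd_iff (d : Int) (h0 : 0 ≤ d) (h10 : d < 10) :
    (!(PySem.Int.mod d 2 == 0)) = true ↔ d ∈ [(1:Int), 3, 5, 7, 9] := by
  rw [PySem.Int.mod_eq_emod_of_pos (by norm_num : (0:Int) < 2)]
  simp only [Bool.not_eq_eq_eq_not, Bool.not_true, beq_eq_false_iff_ne, ne_eq,
    List.mem_cons, List.not_mem_nil, or_false]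
  omega

-- ===== VERDICT (by name: the statement is the Claim_ definition above) =====
theorem kiemTraChuSoChanLe_spec : Claim_equal_kiemTraChuSoChanLe := by
  intro n _
  unfold Spec_kiemTraChuSoChanLe kiemTraChuSoChanLe kiemTraChuSoChanLe_alt
  rw [kLoopA_eq n.toNat n le_rfl]
  have hrange := pvDigits_range n.toNat n le_rfl
  have hmem := sLoopB_mem n.toNat n le_rfl PySem.Set.empty
  refine Prod.ext ?_ ?_
  · simp only [Bool.true_and]
    rw [Bool.eq_iff_iff, List.all_eq_true, PySem.Set.issubset_iff]
    constructor
    · intro hall x hx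
      rcases (hmem x).mp hx with hx' | hx'
      · simp [PySem.Set.empty] at hx'
      · rw [PySem.Set.mem_ofList]
        exact (digit_even_iff x (hrange x hx').1 (hrange x hx').2).mp (hall x hx')
    · intro hsub d hd
      have := hsub d ((hmem d).mpr (Or.inr hd))
      rw [PySem.Set.mem_ofList] at this
      exact (digit_even_iff d (hrange d hd).1 (hrange d hd).2).mpr this
  · simp only [Bool.true_and]
    rw [Bool.eq_iff_iff, List.all_eq_true, PySem.Set.issubset_iff]
    constructor
    · intro hall x hx
      rcases (hmem x).mp hx with hx' | hx'
      · simp [PySem.Set.empty] at hx'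
      · rw [PySem.Set.mem_ofList]
        exact (digit_odd_iff x (hrange x hx').1 (hrange x hx').2).mp (hall x hx')
    · intro hsub d hd
      have := hsub d ((hmem d).mpr (Or.inr hd))
      rw [PySem.Set.mem_ofList] at this
      exact (digit_odd_iff d (hrange d hd).1 (hrange d hd).2).mpr this
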